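-- pv_equiv track=rewrite | github.com/gabriellaec/desoft-analise-exercicios | backup/user_221/ch170_2020_06_20_19_58_52_333598.py | apaga_repetidos
-- ===== SOURCE A (Python) =====
-- def apaga_repetidos(string):
--     nova_string = ''
--     string = string.upper()
--     for i in range(len(string)):
--         if not string[i] in nova_string:
--             nova_string += string[i]
--         else:
--             nova_string += '*'
--     return nova_string
-- ===== SOURCE B (Python) =====
-- def apaga_repetidos(string):
--     s = string.upper()
--     first = {}
--     for i, c in enumerate(s):
--         first.setdefault(c, i)
--     return ''.join(c if first[c] == i else '*' for i, c in enumerate(s))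
-- ===== Notes on version B (the rewrite author's own statement) =====
-- stated objective: alternative
-- what changed: A checks each uppercased char against the growing output string inline (a scan of the output per char); B makes two separate passes: it first builds a dict mapping each char to its first-occurrence index, then emits each char or '*' by comparing that index, never reading the output.
import Mathlib
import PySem

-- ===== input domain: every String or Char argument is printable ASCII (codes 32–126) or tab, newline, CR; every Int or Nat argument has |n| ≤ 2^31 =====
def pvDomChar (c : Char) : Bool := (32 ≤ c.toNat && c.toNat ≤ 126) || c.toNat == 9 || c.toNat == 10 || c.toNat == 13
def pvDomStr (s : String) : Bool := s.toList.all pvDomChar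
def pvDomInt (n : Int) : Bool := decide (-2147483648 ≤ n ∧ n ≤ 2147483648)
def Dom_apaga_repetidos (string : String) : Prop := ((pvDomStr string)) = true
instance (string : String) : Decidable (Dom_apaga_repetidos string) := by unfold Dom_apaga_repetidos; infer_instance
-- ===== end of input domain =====

-- B replaces A's inline membership test against the growing output by two separate passes
-- (a first-occurrence-index dict, then emission); same return value, no speed claim.

-- ===== PORT A =====
-- nova_string = ''; for i in range(len(string.upper())): append string[i] if not in nova_string else '*'
def apaga_repetidos (string : String) : String :=
  let s := PySem.Str.upper string
  String.ofList ((PySem.List.pyRange 0 (PySem.Str.len s) 1).foldl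
    (fun nova i =>
      match PySem.Str.pyGet? s i with
      | some c => if PySem.Chars.isIn [c] nova then nova ++ ['*'] else nova ++ [c]
      | none => nova)   -- unreachable: i ranges over range(len(s))
    [])

-- ===== PORT B =====
-- first = {}; for i, c in enumerate(s): first.setdefault(c, i)
def pvBuildFirst (s : List Char) : PySem.Dict Char Int :=
  (PySem.List.enumerate s).foldl (fun d p => d.setdefault p.2 p.1) PySem.Dict.empty

-- ''.join(c if first[c] == i else '*' for i, c in enumerate(s)); first[c] always hits, so the -1 default is unreachable
def apaga_repetidos_alt (string : String) : String :=
  let s := (PySem.Str.upper string).toList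
  let first := pvBuildFirst s
  String.ofList ((PySem.List.enumerate s).map
    (fun p => if first.getD p.2 (-1) == p.1 then p.2 else '*'))

-- ===== PRECONDITION & SPEC =====
def Spec_apaga_repetidos (string : String) (out : String) : Prop := out = apaga_repetidos_alt string
instance (string : String) (out : String) : Decidable (Spec_apaga_repetidos string out) := by unfold Spec_apaga_repetidos; infer_instance

-- ===== CLAIM (what is proved, stated in full; the proofs are below) =====
def Claim_equal_apaga_repetidos : Prop := ∀ (string : String), Dom_apaga_repetidos string → Spec_apaga_repetidos string (apaga_repetidos string)

-- ===== LEMMAS AND PROOFS =====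

-- the first-occurrence map both programs compute: keep a char the first time, '*' afterwards
def pvCanon (seen : List Char) : List Char → List Char
  | [] => []
  | c :: rest => (if seen.contains c then '*' else c) :: pvCanon (seen ++ [c]) rest

def pvFirstIdx : List Char → Int → Char → Option Int
  | [], _, _ => none
  | x :: rest, k, c => if x = c then some k else pvFirstIdx rest (k + 1) c


lemma foldA_eq (t : List Char) :
    (PySem.List.pyRange 0 (t.length : Int) 1).foldl
      (fun nova i =>
        match PySem.Chars.pyGet? t i with
        | some c => if PySem.Chars.isIn [c] nova then nova ++ ['*'] else nova ++ [c]
        | none => nova) []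
    = t.foldl (fun nova c => if PySem.Chars.isIn [c] nova then nova ++ ['*'] else nova ++ [c]) [] := by
  rw [PySem.List.foldl_congr_mem _ _
      (fun nova i => (fun nova c => if PySem.Chars.isIn [c] nova then nova ++ ['*'] else nova ++ [c])
        nova (PySem.List.pyGetD t i '*')) []
      (by
        intro acc i hi
        rw [PySem.List.mem_pyRange_one] at hi
        lift i to ℕ using hi.1
        have hlt : i < t.length := by exact_mod_cast hi.2
        simp [PySem.Chars.pyGet?_eq_listPyGet?, PySem.List.pyGet?_natCast,
          PySem.List.pyGetD_natCast, List.getElem?_eq_getElem hlt, List.getD_eq_getElem?_getD])]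
  have h := PySem.List.foldl_pyRange_zero_pyGetD t '*'
    (fun nova c => if PySem.Chars.isIn [c] nova then nova ++ ['*'] else nova ++ [c]) []
  simpa [PySem.List.len] using h

lemma foldA_canon : ∀ (t seen nova : List Char),
    (∀ c, c ≠ '*' → (c ∈ nova ↔ c ∈ seen)) →
    t.foldl (fun nova c => if PySem.Chars.isIn [c] nova then nova ++ ['*'] else nova ++ [c]) nova
      = nova ++ pvCanon seen t := by
  intro t
  induction t with
  | nil => intro seen nova h; simp [pvCanon]
  | cons c rest ih =>
    intro seen nova h
    have hmem : PySem.Chars.isIn [c] nova = true ↔ c ∈ nova := by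
      rw [PySem.Chars.isIn_iff_infix, List.singleton_infix_iff]
    by_cases hc : c = '*'
    · subst hc
      have hstep : (if PySem.Chars.isIn ['*'] nova then nova ++ ['*'] else nova ++ ['*'])
          = nova ++ ['*'] := by split <;> rfl
      have hcanon : pvCanon seen ('*' :: rest)
          = '*' :: pvCanon (seen ++ ['*']) rest := by
        simp only [pvCanon]; split <;> rfl
      simp only [List.foldl_cons, hstep, hcanon]
      rw [ih (seen ++ ['*']) (nova ++ ['*'])
        (by intro c' hc'; simp [List.mem_append, hc', h c' hc'])]
      simp
    · by_cases hs : c ∈ seen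
      · have hn : c ∈ nova := (h c hc).2 hs
        simp only [List.foldl_cons, if_pos (hmem.2 hn), pvCanon,
          if_pos (List.contains_iff_mem.2 hs)]
        rw [ih (seen ++ [c]) (nova ++ ['*'])
          (by
            intro c' hc'
            simp only [List.mem_append, List.mem_singleton]
            rw [h c' hc']
            constructor
            · rintro (h1 | h1); exact Or.inl h1; exact absurd h1 hc'
            · rintro (h1 | h1); exact Or.inl h1; subst h1; exact Or.inl hs)]
        simp
      · have hn : c ∉ nova := fun hx => hs ((h c hc).1 hx)
        have : PySem.Chars.isIn [c] nova = false := by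
          rw [Bool.eq_false_iff]; intro hx; exact hn (hmem.1 hx)
        simp only [List.foldl_cons, this, Bool.false_eq_true, if_false, pvCanon,
          if_neg (fun hx => hs (List.contains_iff_mem.1 hx))]
        rw [ih (seen ++ [c]) (nova ++ [c])
          (by intro c' hc'; simp [List.mem_append, h c' hc'])]
        simp

lemma get_build : ∀ (t : List Char) (k : Int) (d : PySem.Dict Char Int) (c : Char),
    ((PySem.List.enumerate t k).foldl (fun d p => d.setdefault p.2 p.1) d).get? c
      = match d.get? c with
        | some v => some v
        | none => pvFirstIdx t k c := by
  intro t
  induction t with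
  | nil => intro k d c; simp [PySem.List.enumerate_nil, pvFirstIdx]; cases d.get? c <;> rfl
  | cons x rest ih =>
    intro k d c
    rw [PySem.List.enumerate_cons, List.foldl_cons, ih]
    by_cases hx : x = c
    · subst hx
      rw [PySem.Dict.get?_setdefault_self]
      simp only [pvFirstIdx]
      cases hdx : d.get? x <;> simp
    · rw [PySem.Dict.get?_setdefault_of_ne d k (Ne.symm hx)]
      simp only [pvFirstIdx, if_neg hx]

lemma pvFirstIdx_append : ∀ (pre t : List Char) (k : Int) (c : Char),
    pvFirstIdx (pre ++ t) k c
      = if c ∈ pre then pvFirstIdx pre k c else pvFirstIdx t (k + pre.length) c := by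
  intro pre
  induction pre with
  | nil => intro t k c; simp [pvFirstIdx]
  | cons x rest ih =>
    intro t k c
    by_cases hx : x = c
    · subst hx; simp [pvFirstIdx]
    · simp only [List.cons_append, pvFirstIdx, if_neg hx, ih,
        List.mem_cons, List.length_cons]
      have : ¬ c = x := fun h => hx h.symm
      simp only [this, false_or]
      split <;> [rfl; (congr 1; push_cast; ring)]

lemma pvFirstIdx_bounds : ∀ (t : List Char) (k : Int) (c : Char) (j : Int),
    pvFirstIdx t k c = some j → k ≤ j ∧ j < k + t.length := by
  intro t
  induction t with
  | nil => intro k c j h; simp [pvFirstIdx] at h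
  | cons x rest ih =>
    intro k c j h
    simp only [pvFirstIdx] at h
    split at h
    · cases h; push_cast [List.length_cons]; omega
    · have := ih (k + 1) c j h
      simp only [List.length_cons]
      push_cast
      omega

lemma getFirst (full : List Char) (c : Char) :
    (pvBuildFirst full).get? c = pvFirstIdx full 0 c := by
  unfold pvBuildFirst
  rw [get_build]
  simp [PySem.Dict.get?_empty]

lemma pvFirstIdx_isSome : ∀ (t : List Char) (k : Int) (c : Char), c ∈ t →
    ∃ j, pvFirstIdx t k c = some j := by
  intro t
  induction t with
  | nil => intro k c h; simp at h
  | cons x rest ih =>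
    intro k c h
    by_cases hx : x = c
    · exact ⟨k, by simp [pvFirstIdx, hx]⟩
    · have : c ∈ rest := by
        rcases List.mem_cons.1 h with h1 | h1
        · exact absurd h1.symm hx
        · exact h1
      obtain ⟨j, hj⟩ := ih (k + 1) c this
      exact ⟨j, by simp [pvFirstIdx, hx, hj]⟩

lemma mapB_canon : ∀ (t pre full : List Char), full = pre ++ t →
    (PySem.List.enumerate t (pre.length : Int)).map
      (fun p => if (pvBuildFirst full).getD p.2 (-1) == p.1 then p.2 else '*')
      = pvCanon pre t := by
  intro t
  induction t with
  | nil => intro pre full h; simp [PySem.List.enumerate_nil, pvCanon]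
  | cons c rest ih =>
    intro pre full h
    rw [PySem.List.enumerate_cons, List.map_cons]
    have hD : (pvBuildFirst full).getD c (-1) = (pvFirstIdx (pre ++ c :: rest) 0 c).getD (-1) := by
      simp only [PySem.Dict.getD, getFirst, h]
    have hhead : (if ((pvBuildFirst full).getD c (-1) == (pre.length : Int)) then c else '*')
        = (if pre.contains c then '*' else c) := by
      by_cases hm : c ∈ pre
      · obtain ⟨j, hj⟩ := pvFirstIdx_isSome pre 0 c hm
        have hb := pvFirstIdx_bounds pre 0 c j hj
        have hval : (pvBuildFirst full).getD c (-1) = j := by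
          rw [hD, pvFirstIdx_append, if_pos hm, hj]; rfl
        have hne : (j == (pre.length : Int)) = false := by
          simp only [beq_eq_false_iff_ne, ne_eq]; omega
        simp only [hval, hne, Bool.false_eq_true, if_false, if_pos (List.contains_iff_mem.2 hm)]
      · have hval : (pvBuildFirst full).getD c (-1) = (pre.length : Int) := by
          rw [hD, pvFirstIdx_append, if_neg hm]
          simp [pvFirstIdx]
        have hcon : pre.contains c = false := by
          rw [Bool.eq_false_iff]; intro hx; exact hm (List.contains_iff_mem.1 hx)
        simp only [hval, beq_self_eq_true, if_true, hcon, Bool.false_eq_true, if_false]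
    have htail := ih (pre ++ [c]) full (by rw [h]; simp)
    have hlen : ((pre ++ [c]).length : Int) = (pre.length : Int) + 1 := by
      simp [List.length_append]
    rw [hlen] at htail
    simp only [pvCanon, hhead, htail]

-- ===== VERDICT (by name: the statement is the Claim_ definition above) =====
theorem apaga_repetidos_spec : Claim_equal_apaga_repetidos := by
  intro string _
  unfold Spec_apaga_repetidos apaga_repetidos apaga_repetidos_alt
  have hB := mapB_canon (PySem.Chars.upper string.toList) [] (PySem.Chars.upper string.toList) rfl
  simp only [List.length_nil, Nat.cast_zero] at hB
  simp only [PySem.Str.pyGet?_eq, PySem.Str.len_eq, PySem.Str.toList_upper]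
  rw [foldA_eq, foldA_canon _ [] [] (by simp), hB]
  simp
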